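-- pv_equiv track=rewrite | github.com/japando24/s25_KTLT | C1/func.py | count_c_max
-- ===== SOURCE A (Python) =====
-- def count_c_max(s):
--     org_s=s.lower()
--     out_s = ""
--     count_max = 0
--     res_s = ""
--     for c in org_s:
--         if c != " " and c not in out_s:
--             out_s += c
--     for c in out_s:
--         count = org_s.count(c)
--         if count > count_max:
--             count_max = count
--             res_s = c + ","
--         elif count == count_max:
--             res_s += c + ","
--     return res_s.rstrip(","), count_max
-- ===== SOURCE B (Python) =====
-- def count_c_max(s):
--     t = s.lower()
--     counts = {}
--     for c in t:
--         if c != ' ':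
--             counts[c] = counts.get(c, 0) + 1
--     max_count = max(counts.values(), default=0)
--     return ','.join(c for c in counts if counts[c] == max_count), max_count
-- ===== Notes on version B (the rewrite author's own statement) =====
-- stated objective: simpler
-- what changed: A dedups the non-space characters into a string and then re-scans the whole string with str.count for each of them, tracking the running max with a reset-and-append accumulator and finally rstrip-ing the trailing comma; B builds a frequency dictionary in one pass, takes max(values, default=0), and joins the equally-frequent keys with ','.join, so empty/all-space input needs no special case.
-- intended difference: On inputs where ',' is itself one of the most-frequent non-space characters and is the last such character in first-appearance order, A's rstrip(',') also deletes that winning ',' from the answer (A(",") = ("", 1)), while B returns the full ','-joined selection ((",", 1)), which is the intended value. — e.g. on count_c_max(","): A returns ("", 1), B returns (",", 1)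
import Mathlib
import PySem

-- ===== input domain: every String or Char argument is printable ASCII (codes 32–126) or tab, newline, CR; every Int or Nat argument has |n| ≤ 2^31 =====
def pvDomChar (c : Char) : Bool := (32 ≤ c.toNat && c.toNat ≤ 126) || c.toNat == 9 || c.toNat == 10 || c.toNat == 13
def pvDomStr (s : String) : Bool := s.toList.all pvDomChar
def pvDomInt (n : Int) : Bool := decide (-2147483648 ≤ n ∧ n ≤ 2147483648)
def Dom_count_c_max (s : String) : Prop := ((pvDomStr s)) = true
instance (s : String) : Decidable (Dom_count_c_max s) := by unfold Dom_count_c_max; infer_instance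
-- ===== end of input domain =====

-- B replaces A's quadratic dedup-then-recount scan by a one-pass frequency dictionary (objective: simpler/idiomatic);
-- equivalence is on the return value (neither version mutates its argument).

-- ===== PORT A =====
-- hand port of str.rstrip(","): drop every trailing ',' (exact: the strip set is the single char ',')
def pvRstripCommas (l : List Char) : List Char := (l.reverse.dropWhile (fun c => c == ',')).reverse

def count_c_max (s : String) : String × Int :=
  let org : List Char := (PySem.Str.lower s).toList
  -- for c in org_s: if c != " " and c not in out_s: out_s += c   (1-char 'in' a string = char membership, exact)
  let out_s : List Char :=
    org.foldl (fun out c => if (c != ' ') && !(out.contains c) then out ++ [c] else out) []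
  -- for c in out_s: count = org_s.count(c); if/elif …
  let st : Int × List Char :=
    out_s.foldl (fun st c =>
      let count : Int := (PySem.Chars.count org [c] : Int)
      if count > st.1 then (count, [c, ','])
      else if count = st.1 then (st.1, st.2 ++ [c, ','])
      else st) ((0 : Int), ([] : List Char))
  (String.ofList (pvRstripCommas st.2), st.1)

-- ===== PORT B =====
def count_c_max_alt (s : String) : String × Int :=
  let t : List Char := (PySem.Str.lower s).toList
  let counts : PySem.Dict Char Int :=
    t.foldl (fun d c => if c != ' ' then d.insert c (d.getD c 0 + 1) else d) PySem.Dict.empty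
  let maxCount : Int := PySem.List.maxD counts.values (fun v => v) 0
  (String.ofList (PySem.Chars.join [',']
      ((counts.keys.filter (fun c => counts.getD c 0 == maxCount)).map (fun c => [c]))),
   maxCount)

-- ===== PRECONDITION & SPEC =====
-- On inputs where ',' is itself one of the most-frequent non-space characters of s.lower() and every
-- other equally-frequent character appears (first) before the first ',' — i.e. ',' is the last winner
-- in first-appearance order — A's rstrip(",") (meant to drop the trailing separator) also eats the
-- winning ',' itself, so A returns the answer with that winner missing (e.g. ("", 1) on ",");
-- B returns the full answer ((",", 1) there), which is the intended value.
def D_count_c_max (s : String) : Prop :=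
  let L := PySem.Chars.lower s.toList
  ',' ∈ L ∧ ∀ c ∈ L, c ≠ ' ' →
    L.count c < L.count ',' ∨ c = ',' ∨
      (L.count c = L.count ',' ∧ c ∈ L.takeWhile (fun x => x != ','))
instance (s : String) : Decidable (D_count_c_max s) := by unfold D_count_c_max; infer_instance

def Spec_count_c_max (s : String) (out : String × Int) : Prop :=
  ¬ D_count_c_max s → out = count_c_max_alt s
instance (s : String) (out : String × Int) : Decidable (Spec_count_c_max s out) := by
  unfold Spec_count_c_max; infer_instance

def pvDiffWitness_count_c_max : String := ","
def pvDiffWitnessOut_count_c_max : (String × Int) × (String × Int) := (("", 1), (",", 1))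

-- ===== CLAIM (what is proved, stated in full; the proofs are below) =====
def Claim_unchanged_count_c_max : Prop :=
  ∀ (s : String), Dom_count_c_max s → Spec_count_c_max s (count_c_max s)
def Claim_changed_count_c_max : Prop :=
  Dom_count_c_max (pvDiffWitness_count_c_max) ∧ D_count_c_max (pvDiffWitness_count_c_max) ∧
  count_c_max (pvDiffWitness_count_c_max) = pvDiffWitnessOut_count_c_max.1 ∧
  count_c_max_alt (pvDiffWitness_count_c_max) = pvDiffWitnessOut_count_c_max.2 ∧
  pvDiffWitnessOut_count_c_max.1 ≠ pvDiffWitnessOut_count_c_max.2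
def Claim_exact_count_c_max : Prop :=
  ∀ (s : String), Dom_count_c_max s → D_count_c_max s → count_c_max s ≠ count_c_max_alt s

-- ===== LEMMAS AND PROOFS =====

-- proof-side names for the lowered characters, their non-space part, the maximal frequency,
-- and the most-frequent distinct characters in first-appearance order
def pvL (s : String) : List Char := PySem.Chars.lower s.toList
def pvF (s : String) : List Char := (pvL s).filter (fun c => c != ' ')
def pvM (s : String) : Int :=
  List.foldl max 0 ((PySem.List.dedup (pvF s)).map (fun c => ((pvF s).count c : Int)))
def pvSel (s : String) : List Char :=
  (PySem.List.dedup (pvF s)).filter (fun c => ((pvF s).count c : Int) == pvM s)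

-- str.count with a 1-character needle is the character count
lemma chars_count_go_singleton (c : Char) (l : List Char) :
    ∀ (fuel acc : Nat), l.length ≤ fuel →
      PySem.Chars.count.go [c] fuel l acc = acc + l.count c := by
  induction l with
  | nil => intro fuel acc _; cases fuel <;> simp [PySem.Chars.count.go]
  | cons x t ih =>
    intro fuel acc hf
    cases fuel with
    | zero => simp at hf
    | succ n =>
      have hn : t.length ≤ n := by simpa using hf
      by_cases hx : c = x
      · subst hx
        simp [PySem.Chars.count.go, List.isPrefixOf, ih n (acc + 1) hn]
        omega
      · have : (c == x) = false := by simp [hx]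
        simp [PySem.Chars.count.go, List.isPrefixOf, this, ih n acc hn, Ne.symm hx]

lemma chars_count_singleton (l : List Char) (c : Char) :
    PySem.Chars.count l [c] = l.count c := by
  simpa using chars_count_go_singleton c l l.length 0 le_rfl

-- A's first loop builds exactly the ordered dedup of the non-space characters
lemma outs_eq (org : List Char) :
    org.foldl (fun out c => if (c != ' ') && !(out.contains c) then out ++ [c] else out) [] =
      PySem.List.dedup (org.filter (fun c => c != ' ')) := by
  rw [PySem.List.dedup_eq_ofList, PySem.Set.ofList_eq_foldl]
  rw [PySem.List.foldl_congr_mem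
        (g := fun out c => if (c != ' ') then (if out.contains c then out else out ++ [c]) else out)
        _ _ _ (by intro acc x _; by_cases h1 : (x != ' ') <;> by_cases h2 : acc.contains x <;>
                  simp [h1])]
  rw [PySem.List.foldl_if_eq_foldl_filter]
  exact PySem.List.foldl_congr_mem _ _ _ _ (by intro acc x _; rfl)

-- A's second loop: running max plus reset/append = final max and the filtered winners
lemma loopA (f : Char → Int) (K : List Char) :
    K.foldl (fun st c =>
        if f c > st.1 then (f c, [c, ','])
        else if f c = st.1 then (st.1, st.2 ++ [c, ','])
        else st) ((0 : Int), ([] : List Char)) =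
      (K.foldl (fun m c => max m (f c)) 0,
       (K.filter (fun c => f c == K.foldl (fun m c => max m (f c)) 0)).flatMap
         (fun c => [c, ','])) := by
  induction K using List.reverseRecOn with
  | nil => simp
  | append_singleton K' c ih =>
    have hmax : ∀ x ∈ K', f x ≤ K'.foldl (fun m c => max m (f c)) 0 :=
      (PySem.List.le_foldl_max_int K' f 0).2
    rw [List.foldl_append, List.foldl_append, ih, List.filter_append]
    set m := K'.foldl (fun m c => max m (f c)) 0 with hm
    simp only [List.foldl_cons, List.foldl_nil]
    by_cases h1 : f c > m
    · have hmc : max m (f c) = f c := by omega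
      have hfil : K'.filter (fun x => f x == f c) = [] := by
        rw [List.filter_eq_nil_iff]
        intro x hx hbx
        have := hmax x hx
        have : f x = f c := by simpa using hbx
        omega
      simp [h1, hmc, hfil]
    · have hmc : max m (f c) = m := by omega
      by_cases h2 : f c = m
      · simp [h2, List.flatMap_append]
      · have hcfil : (f c == m) = false := by simp [h2]
        simp [h2, hmc, hcfil]
        omega

-- port A in terms of pvSel / pvM
lemma portA_eq (s : String) :
    count_c_max s =
      (String.ofList (pvRstripCommas ((pvSel s).flatMap (fun c => [c, ',']))), pvM s) := by
  unfold count_c_max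
  simp only [PySem.Str.toList_lower, outs_eq, loopA]
  have hL : PySem.Chars.lower s.toList = pvL s := rfl
  rw [hL]
  have hF : (pvL s).filter (fun c => c != ' ') = pvF s := rfl
  rw [hF]
  have hcnt : ∀ c ∈ PySem.List.dedup (pvF s),
      (PySem.Chars.count (pvL s) [c] : Int) = ((pvF s).count c : Int) := by
    intro c hc
    have hc' : (c != ' ') = true :=
      (List.mem_filter.mp ((PySem.List.mem_dedup (pvF s) c).mp hc)).2
    rw [chars_count_singleton, ← hF,
      List.count_filter (p := fun x => x != ' ') (a := c) hc']
  have hmaxeq :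
      (PySem.List.dedup (pvF s)).foldl (fun m c => max m ((PySem.Chars.count (pvL s) [c] : Int))) 0
        = pvM s := by
    rw [PySem.List.foldl_congr_mem
          (g := fun m c => max m (((pvF s).count c : Int))) _ _ _
          (by intro acc x hx; rw [hcnt x hx]), pvM, List.foldl_map]
  rw [hmaxeq]
  have hsel :
      (PySem.List.dedup (pvF s)).filter (fun c => (PySem.Chars.count (pvL s) [c] : Int) == pvM s)
        = pvSel s := by
    rw [pvSel]
    exact List.filter_congr (by intro x hx; rw [hcnt x hx])
  rw [hsel]

-- port B in terms of pvSel / pvM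
lemma portB_eq (s : String) :
    count_c_max_alt s =
      (String.ofList (PySem.Chars.join [','] ((pvSel s).map (fun c => [c]))), pvM s) := by
  unfold count_c_max_alt
  simp only [PySem.Str.toList_lower]
  have hd : (PySem.Chars.lower s.toList).foldl
      (fun d c => if c != ' ' then d.insert c (d.getD c 0 + 1) else d) PySem.Dict.empty
        = PySem.Dict.counter (pvF s) := by
    rw [PySem.List.foldl_if_eq_foldl_filter, PySem.Dict.foldl_insert_getD_add_one_eq_counter]
    rfl
  rw [hd]
  have hvals : (PySem.Dict.counter (pvF s)).values
      = (PySem.List.dedup (pvF s)).map (fun c => (((pvF s).count c : Int))) := by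
    simp only [PySem.Dict.values, PySem.Dict.items_counter, List.map_map,
      ← PySem.List.dedup_eq_ofList]
    rfl
  have hmax : PySem.List.maxD (PySem.Dict.counter (pvF s)).values (fun v => v) 0 = pvM s := by
    rw [hvals, pvM]
    cases hK : PySem.List.dedup (pvF s) with
    | nil => simp [PySem.List.maxD_nil]
    | cons x t =>
      simp only [List.map_cons, PySem.List.maxD_id_cons, List.foldl_cons]
      have : max (0 : Int) ((pvF s).count x : Int) = ((pvF s).count x : Int) :=
        max_eq_right (Int.natCast_nonneg _)
      rw [this]
  rw [hmax]
  have hkeys : (PySem.Dict.counter (pvF s)).keys = PySem.List.dedup (pvF s) := by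
    rw [PySem.Dict.keys_counter, ← PySem.List.dedup_eq_ofList]
  rw [hkeys]
  have hsel : (PySem.List.dedup (pvF s)).filter
      (fun c => (PySem.Dict.counter (pvF s)).getD c 0 == pvM s) = pvSel s := by
    rw [pvSel]
    exact List.filter_congr (by intro x _; rw [PySem.Dict.getD_counter])
  rw [hsel]

-- ','.join over 1-char pieces versus the "c," pairs
lemma join_map_concat (l : List Char) (a : Char) :
    PySem.Chars.join [','] ((l ++ [a]).map (fun c => [c])) =
      l.flatMap (fun c => [c, ',']) ++ [a] := by
  induction l with
  | nil => simp [PySem.Chars.join_singleton]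
  | cons x t ih =>
    have : ((x :: t) ++ [a]).map (fun c => ([c] : List Char))
        = [x] :: ((t ++ [a]).map (fun c => [c])) := by simp
    rw [this]
    cases ht : (t ++ [a]).map (fun c => ([c] : List Char)) with
    | nil => simp at ht
    | cons y ys =>
      rw [PySem.Chars.join_cons_cons, ← ht, ih]
      simp

lemma rstrip_pairs (l : List Char) (a : Char) (ha : (a == ',') = false) :
    pvRstripCommas (l.flatMap (fun c => [c, ',']) ++ [a, ',']) =
      l.flatMap (fun c => [c, ',']) ++ [a] := by
  unfold pvRstripCommas
  have : (l.flatMap (fun c => [c, ',']) ++ [a, ',']).reverse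
      = ',' :: a :: (l.flatMap (fun c => [c, ','])).reverse := by simp
  rw [this, List.dropWhile_cons, List.dropWhile_cons]
  simp [ha]

-- head of a dropWhile never satisfies the predicate
lemma head?_dropWhile (p : Char → Bool) (l : List Char) (c : Char)
    (h : (l.dropWhile p).head? = some c) : p c = false := by
  induction l with
  | nil => simp at h
  | cons x t ih =>
    rw [List.dropWhile_cons] at h
    by_cases hx : p x
    · simp [hx] at h; exact ih h
    · simp [hx] at h; simpa [← h] using hx

lemma rstrip_getLast (l : List Char) : pvRstripCommas l ≠ [] →
    (pvRstripCommas l).getLast? ≠ some ',' := by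
  intro _ hlast
  rw [pvRstripCommas, List.getLast?_reverse] at hlast
  have := head?_dropWhile (fun c => c == ',') l.reverse ',' hlast
  simp at this

-- takeWhile commutes with a filter when each test tolerates the other's stopper
lemma tw_filter (p q : Char → Bool) (l : List Char)
    (h1 : ∀ x ∈ l, q x = false → p x = true) (h2 : ∀ x ∈ l, p x = false → q x = true) :
    (l.filter p).takeWhile q = (l.takeWhile q).filter p := by
  induction l with
  | nil => simp
  | cons x t ih =>
    have iht := ih (fun y hy => h1 y (List.mem_cons_of_mem _ hy))
                   (fun y hy => h2 y (List.mem_cons_of_mem _ hy))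
    by_cases hp : p x
    · by_cases hq : q x
      · simp [hp, hq, iht]
      · simp [hp, hq]
    · have hq : q x = true := h2 x List.mem_cons_self (by simpa using hp)
      simp [hp, hq, iht]

-- a list with b appended, b fresh: everything before b is the whole front
lemma tw_concat (l : List Char) (b : Char) (hb : b ∉ l) :
    (l ++ [b]).takeWhile (fun x => x != b) = l := by
  induction l with
  | nil => simp
  | cons x t ih =>
    have hx : x ≠ b := fun h => hb (h ▸ List.mem_cons_self)
    have iht := ih (fun h => hb (List.mem_cons_of_mem _ h))
    simp [hx, iht]

-- a cannot be before the first b while b is before the first a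
lemma tw_asym (a b : Char) (l : List Char)
    (ha : a ∈ l.takeWhile (fun x => x != b)) (hb : b ∈ l.takeWhile (fun x => x != a)) : False := by
  induction l with
  | nil => simp at ha
  | cons x t ih =>
    rw [List.takeWhile_cons] at ha hb
    by_cases hxb : x = b
    · subst hxb
      simp at ha
    · by_cases hxa : x = a
      · subst hxa
        simp at hb
      · have hqb : (x != b) = true := by simp [bne_iff_ne, hxb]
        have hqa : (x != a) = true := by simp [bne_iff_ne, hxa]
        simp [hqb] at ha
        simp [hqa] at hb
        rcases ha with ha | ha
        · exact hxa ha.symm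
        rcases hb with hb | hb
        · exact hxb hb.symm
        exact ih ha hb

-- ordered dedup commutes with "the part before the first b"
lemma dedup_tw (b : Char) (l : List Char) :
    PySem.List.dedup (l.takeWhile (fun x => x != b)) =
      (PySem.List.dedup l).takeWhile (fun x => x != b) := by
  simp only [PySem.List.dedup_eq_ofList]
  induction l with
  | nil => rfl
  | cons x t ih =>
    by_cases hxb : x = b
    · have hqb : ((x != b) : Bool) = false := by simp [hxb]
      rw [List.takeWhile_cons, hqb, PySem.Set.ofList_cons, List.takeWhile_cons, hqb]
      rfl
    · have hq : (x != b) = true := by simp [bne_iff_ne, hxb]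
      have hcomm : PySem.Set.discard (List.takeWhile (fun y => y != b) (PySem.Set.ofList t)) x
          = List.takeWhile (fun y => y != b) (PySem.Set.discard (PySem.Set.ofList t) x) :=
        (tw_filter (fun y => !(y == x)) (fun y => y != b) (PySem.Set.ofList t)
          (by intro y _ hy
              have hyb : y = b := by simpa using hy
              subst hyb
              simp [Ne.symm hxb])
          (by intro y _ hy
              have hyx : y = x := by simpa using hy
              subst hyx
              exact hq)).symm
      rw [List.takeWhile_cons, if_pos hq, PySem.Set.ofList_cons, PySem.Set.ofList_cons, ih,
        List.takeWhile_cons, if_pos hq, hcomm]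

-- membership and count facts about pvF / pvM / pvSel
lemma mem_pvF_iff (s : String) (c : Char) : c ∈ pvF s ↔ c ∈ pvL s ∧ c ≠ ' ' := by
  simp [pvF, List.mem_filter, bne_iff_ne]

lemma count_pvF (s : String) (c : Char) (hc : c ≠ ' ') : (pvF s).count c = (pvL s).count c := by
  rw [pvF, List.count_filter (p := fun x => x != ' ') (a := c) (by simpa [bne_iff_ne] using hc)]

lemma cnt_le_pvM (s : String) (c : Char) (hc : c ∈ pvF s) :
    ((pvF s).count c : Int) ≤ pvM s := by
  rw [pvM, List.foldl_map]
  exact (PySem.List.le_foldl_max_int (PySem.List.dedup (pvF s))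
    (fun c => ((pvF s).count c : Int)) 0).2 c ((PySem.List.mem_dedup (pvF s) c).mpr hc)

lemma pvM_le (s : String) (b : Char)
    (h : ∀ c ∈ pvF s, (pvF s).count c ≤ (pvF s).count b) :
    pvM s ≤ ((pvF s).count b : Int) := by
  rw [pvM]
  rcases PySem.List.foldl_max_mem ((PySem.List.dedup (pvF s)).map
      (fun c => ((pvF s).count c : Int))) 0 with h0 | hmem
  · rw [h0]; exact Int.natCast_nonneg _
  · rcases List.mem_map.mp hmem with ⟨c0, hc0, hc0e⟩
    rw [← hc0e]
    exact_mod_cast h c0 ((PySem.List.mem_dedup (pvF s) c0).mp hc0)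

lemma mem_pvSel_iff (s : String) (c : Char) :
    c ∈ pvSel s ↔ c ∈ pvF s ∧ ((pvF s).count c : Int) = pvM s := by
  rw [pvSel]
  simp [List.mem_filter]

lemma nodup_pvSel (s : String) : (pvSel s).Nodup :=
  (PySem.List.nodup_dedup (pvF s)).filter _

-- before-first-b transfers between the lowered list, its non-space part, and pvSel
lemma tw_pvF_of_tw_pvL (s : String) (b c : Char) (hb : b ≠ ' ') (hc : c ≠ ' ')
    (h : c ∈ (pvL s).takeWhile (fun x => x != b)) : c ∈ (pvF s).takeWhile (fun x => x != b) := by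
  rw [pvF, tw_filter (fun x => x != ' ') (fun x => x != b) (pvL s)
    (by intro y _ hy
        have hyb : y = b := by simpa using hy
        subst hyb
        simpa [bne_iff_ne] using hb)
    (by intro y _ hy
        have hys : y = ' ' := by simpa using hy
        subst hys
        simpa [bne_iff_ne] using (Ne.symm hb))]
  exact List.mem_filter.mpr ⟨h, by simpa [bne_iff_ne] using hc⟩

lemma tw_pvL_of_tw_pvF (s : String) (b c : Char) (hb' : b ≠ ' ')
    (h : c ∈ (pvF s).takeWhile (fun x => x != b)) :
    c ∈ (pvL s).takeWhile (fun x => x != b) := by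
  rw [pvF, tw_filter (fun x => x != ' ') (fun x => x != b) (pvL s)
    (by intro y _ hy
        have hyb : y = b := by simpa using hy
        subst hyb
        simpa [bne_iff_ne] using hb')
    (by intro y _ hy
        have hys : y = ' ' := by simpa using hy
        subst hys
        simpa [bne_iff_ne] using (Ne.symm hb'))] at h
  exact (List.mem_filter.mp h).1

lemma tw_dedup_of_tw_pvSel (s : String) (b c : Char) (hb : b ∈ pvSel s)
    (h : c ∈ (pvSel s).takeWhile (fun x => x != b)) :
    c ∈ (PySem.List.dedup (pvF s)).takeWhile (fun x => x != b) := by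
  have hpb : (((pvF s).count b : Int) == pvM s) = true := by
    simp [((mem_pvSel_iff s b).mp hb).2]
  rw [pvSel, tw_filter (fun c => ((pvF s).count c : Int) == pvM s) (fun x => x != b)
      (PySem.List.dedup (pvF s))
    (by intro y _ hy
        have hyb : y = b := by simpa using hy
        subst hyb
        exact hpb)
    (by intro y _ hy
        have hy' : (((pvF s).count y : Int) == pvM s) = false := hy
        simp only [bne_iff_ne]
        intro hyb
        subst hyb
        rw [hy'] at hpb
        simp at hpb)] at h
  exact (List.mem_filter.mp h).1

-- before-first-b in pvF transfers through the ordered dedup (both ways)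
lemma tw_dedup_iff (s : String) (b c : Char) :
    c ∈ (PySem.List.dedup (pvF s)).takeWhile (fun x => x != b) ↔
      c ∈ (pvF s).takeWhile (fun x => x != b) := by
  rw [← dedup_tw, PySem.List.mem_dedup]

-- D_count_c_max says exactly: the selection is nonempty and its last entry is ','
lemma D_iff (s : String) : D_count_c_max s ↔ (pvSel s).getLast? = some ',' := by
  have hcomma_space : (',' : Char) ≠ ' ' := by decide
  constructor
  · rintro ⟨h1, hcl⟩
    replace h1 : ',' ∈ pvL s := h1
    replace hcl : ∀ c ∈ pvL s, c ≠ ' ' →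
        (pvL s).count c < (pvL s).count ',' ∨ c = ',' ∨
          ((pvL s).count c = (pvL s).count ',' ∧
            c ∈ (pvL s).takeWhile (fun x => x != ',')) := hcl
    have h2 : ∀ c ∈ pvL s, c ≠ ' ' → (pvL s).count c ≤ (pvL s).count ',' := by
      intro c hc hs
      rcases hcl c hc hs with h | h | h
      · exact le_of_lt h
      · subst h; exact le_refl _
      · exact le_of_eq h.1
    have h3 : ∀ c ∈ pvL s, c ≠ ' ' → c ≠ ',' →
        (pvL s).count c = (pvL s).count ',' →
        c ∈ (pvL s).takeWhile (fun x => x != ',') := by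
      intro c hc hs hcc hcount
      rcases hcl c hc hs with h | h | h
      · omega
      · exact absurd h hcc
      · exact h.2
    have hcF : ',' ∈ pvF s := (mem_pvF_iff s ',').mpr ⟨h1, hcomma_space⟩
    have hcnt_eq : ((pvF s).count ',' : Int) = pvM s := by
      refine le_antisymm (cnt_le_pvM s ',' hcF) (pvM_le s ',' ?_)
      intro c hcmem
      have hc := (mem_pvF_iff s c).mp hcmem
      rw [count_pvF s c hc.2, count_pvF s ',' hcomma_space]
      exact h2 c hc.1 hc.2
    have hcsel : ',' ∈ pvSel s := (mem_pvSel_iff s ',').mpr ⟨hcF, hcnt_eq⟩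
    have hne : pvSel s ≠ [] := fun h => by simp [h] at hcsel
    rcases List.eq_nil_or_concat' (pvSel s) with h | ⟨l', a, hla⟩
    · exact absurd h hne
    rw [hla, List.getLast?_concat]
    by_cases ha : a = ','
    · rw [ha]
    -- a ≠ ',': derive a contradiction
    exfalso
    have hasel : a ∈ pvSel s := by rw [hla]; simp
    have haF : a ∈ pvF s := ((mem_pvSel_iff s a).mp hasel).1
    have haL := (mem_pvF_iff s a).mp haF
    have hacnt : (pvF s).count a = (pvF s).count ',' := by
      have h1' := ((mem_pvSel_iff s a).mp hasel).2
      have : ((pvF s).count a : Int) = ((pvF s).count ',' : Int) := by rw [h1', hcnt_eq]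
      exact_mod_cast this
    have ha_twL : a ∈ (pvL s).takeWhile (fun x => x != ',') := by
      refine h3 a haL.1 haL.2 ha ?_
      rw [count_pvF s a haL.2, count_pvF s ',' hcomma_space] at hacnt
      exact hacnt
    have ha_twF : a ∈ (pvF s).takeWhile (fun x => x != ',') :=
      tw_pvF_of_tw_pvL s ',' a hcomma_space haL.2 ha_twL
    -- ',' is strictly before a in pvSel, hence before the first a in pvF
    have hnodup := nodup_pvSel s
    have hanotl' : a ∉ l' := by
      rw [hla] at hnodup
      intro hmem
      exact (List.disjoint_of_nodup_append hnodup) hmem (by simp)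
    have hcl' : ',' ∈ l' := by
      rw [hla] at hcsel
      rcases List.mem_append.mp hcsel with h | h
      · exact h
      · simp at h; exact absurd h.symm ha
    have hc_twSel : ',' ∈ (pvSel s).takeWhile (fun x => x != a) := by
      rw [hla, tw_concat l' a hanotl']
      exact hcl'
    have hc_twF : ',' ∈ (pvF s).takeWhile (fun x => x != a) :=
      (tw_dedup_iff s a ',').mp (tw_dedup_of_tw_pvSel s a ',' hasel hc_twSel)
    exact tw_asym a ',' (pvF s) ha_twF hc_twF
  · intro hlast
    obtain ⟨l', hla⟩ := List.getLast?_eq_some_iff.mp hlast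
    have hcsel : ',' ∈ pvSel s := by rw [hla]; simp
    have hcF : ',' ∈ pvF s := ((mem_pvSel_iff s ',').mp hcsel).1
    have hcM : ((pvF s).count ',' : Int) = pvM s := ((mem_pvSel_iff s ',').mp hcsel).2
    refine ⟨((mem_pvF_iff s ',').mp hcF).1, ?_⟩
    intro c hcL hcsp
    replace hcL : c ∈ pvL s := hcL
    have hcFm : c ∈ pvF s := (mem_pvF_iff s c).mpr ⟨hcL, hcsp⟩
    have hle : (pvL s).count c ≤ (pvL s).count ',' := by
      have := le_trans (cnt_le_pvM s c hcFm) (le_of_eq hcM.symm)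
      rw [count_pvF s c hcsp, count_pvF s ',' hcomma_space] at this
      exact_mod_cast this
    by_cases hcc : c = ','
    · exact Or.inr (Or.inl hcc)
    by_cases hcount : (pvL s).count c = (pvL s).count ','
    · refine Or.inr (Or.inr ⟨hcount, ?_⟩)
      have hceq : ((pvF s).count c : Int) = pvM s := by
        rw [← hcM]
        rw [count_pvF s c hcsp, count_pvF s ',' hcomma_space]
        exact_mod_cast hcount
      have hcSel : c ∈ pvSel s := (mem_pvSel_iff s c).mpr ⟨hcFm, hceq⟩
      have hnodup := nodup_pvSel s
      have hcnotl' : (',' : Char) ∉ l' := by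
        rw [hla] at hnodup
        intro hmem
        exact (List.disjoint_of_nodup_append hnodup) hmem (by simp)
      have hcl' : c ∈ l' := by
        rw [hla] at hcSel
        rcases List.mem_append.mp hcSel with h | h
        · exact h
        · simp at h; exact absurd h hcc
      have hc_twSel : c ∈ (pvSel s).takeWhile (fun x => x != ',') := by
        rw [hla, tw_concat l' ',' hcnotl']
        exact hcl'
      have hc_twF : c ∈ (pvF s).takeWhile (fun x => x != ',') :=
        (tw_dedup_iff s ',' c).mp (tw_dedup_of_tw_pvSel s ',' c hcsel hc_twSel)
      exact tw_pvL_of_tw_pvF s ',' c hcomma_space hc_twF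
    · exact Or.inl (lt_of_le_of_ne hle hcount)

-- ===== VERDICT (by name: the statement is the Claim_ definition above) =====
theorem count_c_max_spec : Claim_unchanged_count_c_max := by
  intro s _ hnD
  rw [portA_eq, portB_eq]
  cases hsel : pvSel s using List.reverseRecOn with
  | nil => simp [pvRstripCommas, PySem.Chars.join_nil]
  | append_singleton l a =>
    have ha : (a == ',') = false := by
      by_contra hcon
      have : a = ',' := by simpa using hcon
      exact hnD ((D_iff s).mpr (by rw [hsel, this, List.getLast?_concat]))
    rw [join_map_concat]
    have : (l ++ [a]).flatMap (fun c => [c, ','])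
        = l.flatMap (fun c => [c, ',']) ++ [a, ','] := by simp
    rw [this, rstrip_pairs l a ha]

theorem count_c_max_changed : Claim_changed_count_c_max := by
  unfold Claim_changed_count_c_max
  refine ⟨by decide, ⟨by decide, ?_⟩, by decide, by decide, by decide⟩
  intro c hc _
  right; left
  have hL : PySem.Chars.lower (pvDiffWitness_count_c_max.toList) = [','] := by decide
  rw [hL] at hc
  simpa using hc

theorem count_c_max_tight : Claim_exact_count_c_max := by
  intro s _ hD heq
  have hlast := (D_iff s).mp hD
  obtain ⟨l, hl⟩ := List.getLast?_eq_some_iff.mp hlast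
  rw [portA_eq, portB_eq] at heq
  have hstr := congrArg (fun p => p.1.toList) heq
  simp only [String.toList_ofList] at hstr
  rw [hl] at hstr
  rw [join_map_concat] at hstr
  have hBlast : (l.flatMap (fun c => [c, ',']) ++ [',']).getLast? = some ',' :=
    List.getLast?_concat
  have hAne : pvRstripCommas ((l ++ [',']).flatMap (fun c => [c, ','])) ≠ [] := by
    intro hnil
    rw [hnil] at hstr
    exact (List.append_ne_nil_of_right_ne_nil _ (by simp)) hstr.symm
  have := rstrip_getLast ((l ++ [',']).flatMap (fun c => [c, ','])) hAne
  rw [hstr, hBlast] at this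
  exact this rfl
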